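-- pv_equiv track=rewrite | github.com/ramanflorfresca/antar-fastapi | antar_engine/narayana_dasha.py | _count_signs_forward
-- ===== SOURCE A (Python) =====
-- def _count_signs_forward(start_idx: int, end_idx: int) -> int:
--     """Count signs from start to end going FORWARD, inclusive of end."""
--     if start_idx == end_idx:
--         return 12
--     count = 0
--     current = start_idx
--     while True:
--         current = (current + 1) % 12
--         count += 1
--         if current == end_idx:
--             return count
-- ===== SOURCE B (Python) =====
-- def _count_signs_forward(start_idx: int, end_idx: int) -> int:
--     """Count signs from start to end going FORWARD, inclusive of end."""
--     r = (end_idx - start_idx) % 12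
--     return 12 if r == 0 else r
-- ===== Notes on version B (the rewrite author's own statement) =====
-- stated objective: simpler
-- what changed: The while-loop that steps one sign at a time is replaced by the closed form (end_idx - start_idx) % 12, mapping a zero residue to 12.
import Mathlib
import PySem

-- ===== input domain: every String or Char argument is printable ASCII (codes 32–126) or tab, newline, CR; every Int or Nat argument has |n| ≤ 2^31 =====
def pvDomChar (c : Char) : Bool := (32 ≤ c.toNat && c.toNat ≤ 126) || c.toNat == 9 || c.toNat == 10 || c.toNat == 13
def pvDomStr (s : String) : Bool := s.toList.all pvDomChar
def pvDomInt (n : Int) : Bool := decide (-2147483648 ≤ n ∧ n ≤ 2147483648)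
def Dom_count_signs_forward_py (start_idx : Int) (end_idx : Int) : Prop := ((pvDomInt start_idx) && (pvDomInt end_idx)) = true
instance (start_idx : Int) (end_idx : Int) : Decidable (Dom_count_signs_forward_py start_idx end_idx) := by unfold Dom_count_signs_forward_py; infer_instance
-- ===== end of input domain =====

-- B replaces A's one-sign-at-a-time while-loop by the closed form (end_idx - start_idx) % 12 with 0 mapped to 12 (simpler).

-- ===== PORT A =====
-- A's 'while True' loop; fuel only makes it total (under Pre_ the loop hits end_idx within 12 steps, fuel is never exhausted)
def countLoopA (current count end_idx : Int) : Nat → Int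
  | 0 => 0
  | fuel + 1 =>
    let current' := PySem.Int.mod (current + 1) 12
    let count' := count + 1
    if current' = end_idx then count' else countLoopA current' count' end_idx fuel

def count_signs_forward_py (start_idx : Int) (end_idx : Int) : Int :=
  if start_idx = end_idx then 12
  else countLoopA start_idx 0 end_idx 12

-- ===== PORT B =====
def count_signs_forward_py_alt (start_idx : Int) (end_idx : Int) : Int :=
  let r := PySem.Int.mod (end_idx - start_idx) 12
  if r = 0 then 12 else r

-- ===== PRECONDITION & SPEC =====
-- Pre_ excludes exactly the inputs on which A never returns: when end_idx is outside 0..11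
-- and start_idx ≠ end_idx, A's loop current stays in 0..11 and it loops forever.
def Pre_count_signs_forward_py (start_idx : Int) (end_idx : Int) : Prop :=
  start_idx = end_idx ∨ (0 ≤ end_idx ∧ end_idx ≤ 11)
instance (start_idx : Int) (end_idx : Int) : Decidable (Pre_count_signs_forward_py start_idx end_idx) := by unfold Pre_count_signs_forward_py; infer_instance

def pvWitness_count_signs_forward_py : Int × Int := (3, 7)

def Spec_count_signs_forward_py (start_idx : Int) (end_idx : Int) (out : Int) : Prop := out = count_signs_forward_py_alt start_idx end_idx
instance (start_idx : Int) (end_idx : Int) (out : Int) : Decidable (Spec_count_signs_forward_py start_idx end_idx out) := by unfold Spec_count_signs_forward_py; infer_instance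

-- ===== CLAIM (what is proved, stated in full; the proofs are below) =====
def Claim_equal_count_signs_forward_py : Prop := ∀ (start_idx : Int) (end_idx : Int), Dom_count_signs_forward_py start_idx end_idx → Pre_count_signs_forward_py start_idx end_idx → Spec_count_signs_forward_py start_idx end_idx (count_signs_forward_py start_idx end_idx)

-- ===== LEMMAS AND PROOFS =====

-- the loop adds to count the distance r(current) = ((end - current) mod 12, with 0 read as 12), given enough fuel
theorem countLoopA_eq (fuel : Nat) (current count end_idx : Int)
    (he : 0 ≤ end_idx ∧ end_idx ≤ 11)
    (hf : (if (end_idx - current) % 12 = 0 then 12 else (end_idx - current) % 12) ≤ (fuel : Int)) :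
    countLoopA current count end_idx fuel
      = count + (if (end_idx - current) % 12 = 0 then 12 else (end_idx - current) % 12) := by
  induction fuel generalizing current count with
  | zero =>
    exfalso
    have h0 : 0 ≤ (end_idx - current) % 12 := Int.emod_nonneg _ (by norm_num)
    simp only [Nat.cast_zero] at hf
    split_ifs at hf <;> omega
  | succ f ih =>
    simp only [countLoopA]
    rw [PySem.Int.mod_eq_emod_of_pos (by norm_num : (0:Int) < 12)]
    by_cases hc : (current + 1) % 12 = end_idx
    · simp only [hc]
      -- from hc: (end_idx - current) % 12 = 1
      have h1 : (end_idx - current) % 12 = 1 := by omega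
      rw [h1]; norm_num
    · rw [if_neg hc]
      have hne1 : (end_idx - current) % 12 ≠ 1 := by
        intro h1; apply hc; omega
      have h0 : 0 ≤ (end_idx - current) % 12 := Int.emod_nonneg _ (by norm_num)
      have hlt : (end_idx - current) % 12 < 12 := Int.emod_lt_of_pos _ (by norm_num)
      have hshift : (end_idx - (current + 1) % 12) % 12
          = if (end_idx - current) % 12 = 0 then 11 else (end_idx - current) % 12 - 1 := by
        split_ifs with h <;> omega
      rw [ih ((current + 1) % 12) (count + 1)]
      · rw [hshift]
        split_ifs at hf ⊢ <;> omega
      · rw [hshift]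
        split_ifs at hf ⊢ <;> omega

-- ===== VERDICT (by name: the statement is the Claim_ definition above) =====
theorem count_signs_forward_py_spec : Claim_equal_count_signs_forward_py := by
  intro s e _ hpre
  unfold Spec_count_signs_forward_py count_signs_forward_py count_signs_forward_py_alt
  dsimp only
  rw [PySem.Int.mod_eq_emod_of_pos (by norm_num : (0:Int) < 12)]
  by_cases hse : s = e
  · subst hse
    simp
  · rw [if_neg hse]
    have he : 0 ≤ e ∧ e ≤ 11 := hpre.resolve_left hse
    rw [countLoopA_eq 12 s 0 e he]
    · have h0 : 0 ≤ (e - s) % 12 := Int.emod_nonneg _ (by norm_num)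
      split_ifs <;> omega
    · have h0 : 0 ≤ (e - s) % 12 := Int.emod_nonneg _ (by norm_num)
      have hlt : (e - s) % 12 < 12 := Int.emod_lt_of_pos _ (by norm_num)
      split_ifs <;> push_cast <;> omega
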